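-- pv_equiv track=rewrite | github.com/Isreal-ogbu/PYTHON-PROJECTS | data_structure_and_algorithms/Interview_question.py | most_freq
-- ===== SOURCE A (Python) =====
-- def most_freq(val):
--     arr = []
--     maxi = 1
--     for i in val:
--         if arr and arr[-1][0] == i:
--             arr[-1][1] += 1
--         else:
--             arr.append([i, 1])
--
--         maxi = max(arr[-1][1], maxi)
--     arr1 = []
--     for i, j in arr:
--         if j == maxi:
--             arr1.append([i, j])
--     return str(arr1[-1][0]) + str(arr1[-1][1])
-- ===== SOURCE B (Python) =====
-- def most_freq(val):
--     best_val = cur_val = val[0]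
--     best_len = cur_len = 0
--     for x in val:
--         if x == cur_val:
--             cur_len += 1
--         else:
--             cur_val, cur_len = x, 1
--         if cur_len >= best_len:
--             best_val, best_len = cur_val, cur_len
--     return str(best_val) + str(best_len)
-- ===== Notes on version B (the rewrite author's own statement) =====
-- stated objective: faster
-- what changed: B replaces A's build-a-run-list-then-rescan-for-max with a single pass tracking the current run (value,length) and a running best updated with >= so later ties win; no intermediate list is built.
import Mathlib
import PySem

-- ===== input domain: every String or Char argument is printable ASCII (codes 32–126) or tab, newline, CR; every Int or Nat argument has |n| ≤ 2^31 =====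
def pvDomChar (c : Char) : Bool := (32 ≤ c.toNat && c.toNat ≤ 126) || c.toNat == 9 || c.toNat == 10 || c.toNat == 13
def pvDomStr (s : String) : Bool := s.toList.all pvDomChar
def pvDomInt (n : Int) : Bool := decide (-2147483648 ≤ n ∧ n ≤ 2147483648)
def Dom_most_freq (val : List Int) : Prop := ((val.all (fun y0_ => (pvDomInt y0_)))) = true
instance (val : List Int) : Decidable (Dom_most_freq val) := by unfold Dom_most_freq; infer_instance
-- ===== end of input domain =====

-- B does the same scan in one pass with O(1) state (current run + running best) instead of A's run list plus rescan; equivalence proved for nonempty input (both raise IndexError on []).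


-- ===== PORT A =====
-- one loop step of A: arr is the Python list of [value, count] runs (pairs), st.2 is maxi
def pvStepA (st : List (Int × Int) × Int) (i : Int) : List (Int × Int) × Int :=
  let arr := st.1
  let arr' :=
    match arr.getLast? with          -- `if arr and arr[-1][0] == i`
    | some last => if last.1 == i then arr.dropLast ++ [(last.1, last.2 + 1)] else arr ++ [(i, 1)]
    | none => arr ++ [(i, 1)]
  -- maxi = max(arr[-1][1], maxi); arr' is never empty here so the getD default is unreachable
  (arr', max ((arr'.getLast?.map Prod.snd).getD 1) st.2)

def most_freq (val : List Int) : String :=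
  let st := val.foldl pvStepA ([], 1)
  let arr1 := (st.1.filter (fun p => p.2 == st.2))
  match arr1.getLast? with           -- arr1[-1]; on empty val Python raises IndexError (outside Pre_)
  | some p => PySem.Int.toStr p.1 ++ PySem.Int.toStr p.2
  | none => ""

-- ===== PORT B =====
-- one loop step of B: state is (best_val, best_len, cur_val, cur_len)
def pvStepB (st : Int × Int × Int × Int) (x : Int) : Int × Int × Int × Int :=
  let (bv, bl, cv, cl) := st
  let (cv', cl') := if x == cv then (cv, cl + 1) else (x, 1)
  if bl ≤ cl' then (cv', cl', cv', cl') else (bv, bl, cv', cl')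

def most_freq_alt (val : List Int) : String :=
  match val with
  | [] => ""                         -- Python B raises IndexError at val[0]; outside Pre_
  | v0 :: _ =>
    let st := val.foldl pvStepB (v0, 0, v0, 0)
    PySem.Int.toStr st.1 ++ PySem.Int.toStr st.2.1

-- ===== PRECONDITION & SPEC =====
-- Pre_ excludes only the empty list, on which both A and B raise IndexError.
def Pre_most_freq (val : List Int) : Prop := val ≠ []
instance (val : List Int) : Decidable (Pre_most_freq val) := by unfold Pre_most_freq; infer_instance
def pvWitness_most_freq : List Int := [2, 2, 5, 5, 1]

def Spec_most_freq (val : List Int) (out : String) : Prop := out = most_freq_alt val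
instance (val : List Int) (out : String) : Decidable (Spec_most_freq val out) := by unfold Spec_most_freq; infer_instance

-- ===== CLAIM (what is proved, stated in full; the proofs are below) =====
def Claim_equal_most_freq : Prop := ∀ (val : List Int), Dom_most_freq val → Pre_most_freq val → Spec_most_freq val (most_freq val)

-- ===== LEMMAS AND PROOFS =====

-- Invariant tying A's fold state (arr, maxi) to B's (bv, bl, cv, cl):
-- arr's last run is (cv, cl); bl = maxi; the last run of length maxi is (bv, bl);
-- every run length is between 1 and maxi.
def pvInv (a : List (Int × Int) × Int) (b : Int × Int × Int × Int) : Prop :=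
  a.1.getLast? = some (b.2.2.1, b.2.2.2) ∧
  b.2.1 = a.2 ∧
  (a.1.filter (fun p => p.2 == a.2)).getLast? = some (b.1, b.2.1) ∧
  (∀ p ∈ a.1, 1 ≤ p.2 ∧ p.2 ≤ a.2)

theorem pvStep_inv (a : List (Int × Int) × Int) (b : Int × Int × Int × Int) (x : Int)
    (h : pvInv a b) : pvInv (pvStepA a x) (pvStepB b x) := by
  obtain ⟨arr, maxi⟩ := a
  obtain ⟨bv, bl, cv, cl⟩ := b
  obtain ⟨h1, h2, h3, h4⟩ := h
  simp only at h1 h2 h3 h4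
  subst h2
  obtain ⟨ys, rfl⟩ := List.getLast?_eq_some_iff.mp h1
  have hcl := h4 (cv, cl) (by simp)
  simp only at hcl
  by_cases hx : x = cv
  · subst hx
    have hA : pvStepA (ys ++ [(x, cl)], bl) x = (ys ++ [(x, cl + 1)], max (cl + 1) bl) := by
      simp [pvStepA]
    by_cases hm : bl ≤ cl + 1
    · have hB : pvStepB (bv, bl, x, cl) x = (x, cl + 1, x, cl + 1) := by
        simp [pvStepB, hm]
      rw [hA, hB]
      have hmax : max (cl + 1) bl = cl + 1 := by omega
      refine ⟨by simp, by simp [hmax], ?_, ?_⟩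
      · simp only [hmax, List.filter_append]
        simp
      · intro p hp
        simp only [hmax]
        rcases List.mem_append.mp hp with h | h
        · have := h4 p (by simp [h]); omega
        · obtain rfl := List.mem_singleton.mp h; simp; omega
    · have hB : pvStepB (bv, bl, x, cl) x = (bv, bl, x, cl + 1) := by
        simp [pvStepB, hm]
      rw [hA, hB]
      have hmax : max (cl + 1) bl = bl := by omega
      have hne : ((cl + 1 : Int) == bl) = false := by simp; omega
      have hne' : ((cl : Int) == bl) = false := by simp; omega
      refine ⟨by simp, by simp [hmax], ?_, ?_⟩
      · simp only [hmax, List.filter_append, List.filter_cons, hne, List.filter_nil,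
          List.append_nil]
        simpa [List.filter_append, List.filter_cons, hne'] using h3
      · intro p hp
        simp only [hmax]
        rcases List.mem_append.mp hp with h | h
        · have := h4 p (by simp [h]); omega
        · obtain rfl := List.mem_singleton.mp h; simp; omega
  · have hA : pvStepA (ys ++ [(cv, cl)], bl) x
        = ((ys ++ [(cv, cl)]) ++ [(x, 1)], max 1 bl) := by
      simp [pvStepA, Ne.symm hx]
    have hmax : max 1 bl = bl := by omega
    by_cases hm : bl ≤ 1
    · have hm1 : bl = 1 := by omega
      have hB : pvStepB (bv, bl, cv, cl) x = (x, 1, x, 1) := by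
        simp [pvStepB, hx, hm]
      rw [hA, hB]
      refine ⟨by simp, by simp [hmax, hm1], ?_, ?_⟩
      · simp [hmax, hm1, List.filter_append]
      · intro p hp
        simp only [hmax]
        rcases List.mem_append.mp hp with h | h
        · exact h4 p h
        · obtain rfl := List.mem_singleton.mp h; simp; omega
    · have hB : pvStepB (bv, bl, cv, cl) x = (bv, bl, x, 1) := by
        simp [pvStepB, hx, hm]
      rw [hA, hB]
      have hne : ((1 : Int) == bl) = false := by simp; omega
      refine ⟨by simp, by simp [hmax], ?_, ?_⟩
      · simp only [List.filter_append, List.filter_cons, hne, List.filter_nil,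
          List.append_nil, hmax] at h3 ⊢
        simpa using h3
      · intro p hp
        simp only [hmax]
        rcases List.mem_append.mp hp with h | h
        · exact h4 p h
        · obtain rfl := List.mem_singleton.mp h; simp; omega

theorem pvFold_inv (l : List Int) (a : List (Int × Int) × Int) (b : Int × Int × Int × Int)
    (h : pvInv a b) : pvInv (l.foldl pvStepA a) (l.foldl pvStepB b) := by
  induction l generalizing a b with
  | nil => exact h
  | cons y ys ih => exact ih _ _ (pvStep_inv a b y h)

-- ===== VERDICT (by name: the statement is the Claim_ definition above) =====
theorem most_freq_spec : Claim_equal_most_freq := by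
  intro val _ hpre
  match val with
  | [] => exact absurd rfl hpre
  | v0 :: rest =>
    have hinit : pvInv (pvStepA ([], 1) v0) (pvStepB (v0, 0, v0, 0) v0) := by
      refine ⟨?_, ?_, ?_, ?_⟩ <;> simp [pvStepA, pvStepB]
    have h := pvFold_inv rest _ _ hinit
    obtain ⟨h1, h2, h3, h4⟩ := h
    show most_freq (v0 :: rest) = most_freq_alt (v0 :: rest)
    simp only [most_freq, most_freq_alt, List.foldl_cons]
    rw [h3]
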